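-- pv_equiv track=rewrite | github.com/VPhilavong/Palette | src/palette/quality/config_aware_quality_pipeline.py | _fix_chakra_component_usage
-- ===== SOURCE A (Python) =====
-- def _fix_chakra_component_usage(code: str) -> str:
--     """Fix Chakra UI component usage."""
--     html_to_chakra = {
--         '<div': '<Box',
--         '</div>': '</Box>',
--         '<button': '<Button',
--         '</button>': '</Button>',
--         '<p>': '<Text>',
--         '</p>': '</Text>',
--     }
--
--     for html_element, chakra_component in html_to_chakra.items():
--         code = code.replace(html_element, chakra_component)
--
--     return code
-- ===== SOURCE B (Python) =====
-- def _fix_chakra_component_usage(code: str) -> str: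
--     """Fix Chakra UI component usage."""
--     # longest-first replacement table, consulted once per position in a single
--     # left-to-right scan (instead of one full-string pass per tag)
--     table = [
--         ('</button>', '</Button>'),
--         ('<button', '<Button'),
--         ('</div>', '</Box>'),
--         ('<div', '<Box'),
--         ('</p>', '</Text>'),
--         ('<p>', '<Text>'),
--     ]
--     out = []
--     i = 0
--     n = len(code)
--     while i < n:
--         for html_element, chakra_component in table:
--             if code.startswith(html_element, i):
--                 out.append(chakra_component)
--                 i += len(html_element)
--                 break
--         else:
--             out.append(code[i])
--             i += 1
--     return ''.join(out)
-- ===== Notes on version B (the rewrite author's own statement) =====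
-- stated objective: alternative
-- what changed: A rewrites the whole string six times, one sequential str.replace pass per HTML tag; B makes a single left-to-right scan that consults a longest-first replacement table once per position and emits either a mapped component name or the current character.
import Mathlib
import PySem

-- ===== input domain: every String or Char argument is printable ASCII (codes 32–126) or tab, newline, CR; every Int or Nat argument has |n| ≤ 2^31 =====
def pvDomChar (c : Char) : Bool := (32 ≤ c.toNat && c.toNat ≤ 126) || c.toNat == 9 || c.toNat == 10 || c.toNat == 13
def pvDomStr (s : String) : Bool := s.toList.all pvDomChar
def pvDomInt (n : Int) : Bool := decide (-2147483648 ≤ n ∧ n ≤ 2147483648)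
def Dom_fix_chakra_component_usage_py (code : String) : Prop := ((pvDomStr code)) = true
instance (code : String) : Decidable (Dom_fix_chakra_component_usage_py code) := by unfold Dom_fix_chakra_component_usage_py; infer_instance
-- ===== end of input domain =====

-- B replaces A's six sequential full-string .replace passes by one left-to-right scan that
-- consults a (longest-first) table at each position; same return value, proved equal below.

-- ===== PORT A =====
def fix_chakra_component_usage_py (code : String) : String :=
  let html_to_chakra : PySem.Dict String String :=
    PySem.Dict.ofList [("<div", "<Box"), ("</div>", "</Box>"), ("<button", "<Button"),
      ("</button>", "</Button>"), ("<p>", "<Text>"), ("</p>", "</Text>")]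
  html_to_chakra.items.foldl (fun c p => PySem.Str.replace c p.1 p.2) code

-- ===== PORT B =====
-- sorted(html_to_chakra.items(), key=len of key, reverse=True): longest key first (stable)
def pvTable : List (List Char × List Char) :=
  [("</button>".toList, "</Button>".toList), ("<button".toList, "<Button".toList),
   ("</div>".toList, "</Box>".toList), ("<div".toList, "<Box".toList),
   ("</p>".toList, "</Text>".toList), ("<p>".toList, "<Text>".toList)]

-- the while-loop of Source B: at each position, the first table entry that matches (the for/else)
-- is emitted and skipped, otherwise the current character is emitted; fuel = remaining length
def pvScanAux : Nat → List Char → List Char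
  | 0, l => l
  | _+1, [] => []
  | f+1, c :: t =>
    match pvTable.find? (fun p => p.1.isPrefixOf (c :: t)) with
    | some (k, r) => r ++ pvScanAux f ((c :: t).drop k.length)
    | none => c :: pvScanAux f t

def fix_chakra_component_usage_py_alt (code : String) : String :=
  String.ofList (pvScanAux code.toList.length code.toList)

-- ===== PRECONDITION & SPEC =====
def Spec_fix_chakra_component_usage_py (code : String) (out : String) : Prop := out = fix_chakra_component_usage_py_alt code
instance (code : String) (out : String) : Decidable (Spec_fix_chakra_component_usage_py code out) := by unfold Spec_fix_chakra_component_usage_py; infer_instance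

-- ===== CLAIM (what is proved, stated in full; the proofs are below) =====
def Claim_equal_fix_chakra_component_usage_py : Prop := ∀ (code : String), Dom_fix_chakra_component_usage_py code → Spec_fix_chakra_component_usage_py code (fix_chakra_component_usage_py code)

-- ===== LEMMAS AND PROOFS =====

-- structural-recursion reading of PySem.Chars.replace.go (same fuel, no accumulator)
def pvRepAux (old new : List Char) : Nat → List Char → List Char
  | 0, l => l
  | _+1, [] => []
  | f+1, c :: t =>
    if old.isPrefixOf (c :: t) = true then new ++ pvRepAux old new f ((c :: t).drop old.length)
    else c :: pvRepAux old new f t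

def pvRep (old new l : List Char) : List Char := pvRepAux old new l.length l

-- the six replacements in A's dict order
def pvKeys : List (List Char × List Char) :=
  [("<div".toList, "<Box".toList), ("</div>".toList, "</Box>".toList),
   ("<button".toList, "<Button".toList), ("</button>".toList, "</Button>".toList),
   ("<p>".toList, "<Text>".toList), ("</p>".toList, "</Text>".toList)]

def pvChain (l : List Char) : List Char := pvKeys.foldl (fun s p => pvRep p.1 p.2 s) l

def pvScan (l : List Char) : List Char := pvScanAux l.length l

lemma go_eq (old new : List Char) :
    ∀ (fuel : Nat) (l acc : List Char),
      PySem.Chars.replace.go old new fuel l acc = acc.reverse ++ pvRepAux old new fuel l := by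
  intro fuel
  induction fuel with
  | zero => intro l acc; rfl
  | succ f ih =>
    intro l acc
    cases l with
    | nil => simp [pvRepAux]; rfl
    | cons c t =>
      rw [show PySem.Chars.replace.go old new (f+1) (c::t) acc =
        (if old.isPrefixOf (c::t) = true then
          PySem.Chars.replace.go old new f ((c::t).drop old.length) (new.reverse ++ acc)
        else PySem.Chars.replace.go old new f t (c::acc)) from rfl]
      rw [show pvRepAux old new (f+1) (c::t) =
        (if old.isPrefixOf (c::t) = true then new ++ pvRepAux old new f ((c::t).drop old.length)
        else c :: pvRepAux old new f t) from rfl]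
      split_ifs with hp
      · rw [ih]; simp
      · rw [ih]; simp

lemma replace_eq_rep (old new l : List Char) (ho : old ≠ []) :
    PySem.Chars.replace l old new = pvRep old new l := by
  rw [PySem.Chars.replace]
  have : old.isEmpty = false := by cases old with | nil => exact absurd rfl ho | cons a t => rfl
  rw [this]
  simp only [Bool.false_eq_true, if_false, go_eq, List.reverse_nil, List.nil_append]
  rfl

lemma pvRepAux_succ (old new : List Char) (ho : old ≠ []) :
    ∀ (f : Nat) (l : List Char), l.length ≤ f → pvRepAux old new (f+1) l = pvRepAux old new f l := by
  intro f
  induction f with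
  | zero =>
    intro l hl
    have hnil : l = [] := List.eq_nil_iff_length_eq_zero.mpr (Nat.le_zero.mp hl)
    subst hnil; rfl
  | succ f ih =>
    intro l hl
    cases l with
    | nil => rfl
    | cons c t =>
      rw [show pvRepAux old new (f+1+1) (c::t) =
        (if old.isPrefixOf (c::t) = true then new ++ pvRepAux old new (f+1) ((c::t).drop old.length)
        else c :: pvRepAux old new (f+1) t) from rfl]
      rw [show pvRepAux old new (f+1) (c::t) =
        (if old.isPrefixOf (c::t) = true then new ++ pvRepAux old new f ((c::t).drop old.length)
        else c :: pvRepAux old new f t) from rfl]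
      have hol : 1 ≤ old.length := by cases old with | nil => exact absurd rfl ho | cons a t' => simp
      split_ifs with hp
      · rw [ih _ (by simp at hl ⊢; omega)]
      · rw [ih _ (by simp at hl; omega)]

lemma pvRepAux_eq (old new : List Char) (ho : old ≠ []) :
    ∀ (f : Nat) (l : List Char), l.length ≤ f → pvRepAux old new f l = pvRep old new l := by
  intro f
  induction f with
  | zero => intro l hl; cases l with | nil => rfl | cons c t => simp at hl
  | succ f ih =>
    intro l hl
    rcases Nat.eq_or_lt_of_le hl with he | hlt
    · rw [pvRep, he]
    · rw [pvRepAux_succ old new ho f l (by omega), ih l (by omega)]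

lemma rep_cons_neg (old new : List Char) (c : Char) (t : List Char)
    (h : old.isPrefixOf (c :: t) = false) :
    pvRep old new (c :: t) = c :: pvRep old new t := by
  rw [pvRep, show (c::t).length = t.length + 1 from rfl]
  rw [show pvRepAux old new (t.length+1) (c::t) =
    (if old.isPrefixOf (c::t) = true then new ++ pvRepAux old new t.length ((c::t).drop old.length)
    else c :: pvRepAux old new t.length t) from rfl, h]
  simp [pvRep]

lemma rep_match (old new : List Char) (ho : old ≠ []) (Y : List Char) :
    pvRep old new (old ++ Y) = new ++ pvRep old new Y := by
  cases old with
  | nil => exact absurd rfl ho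
  | cons o old' =>
    rw [pvRep, List.cons_append, show ((o :: (old' ++ Y)).length) = (old' ++ Y).length + 1 from rfl]
    rw [show pvRepAux (o::old') new ((old' ++ Y).length+1) (o::(old'++Y)) =
      (if (o::old').isPrefixOf (o::(old'++Y)) = true then
        new ++ pvRepAux (o::old') new (old'++Y).length ((o::(old'++Y)).drop (o::old').length)
      else o :: pvRepAux (o::old') new (old'++Y).length (old'++Y)) from rfl]
    have hpre : (o::old').isPrefixOf (o::(old'++Y)) = true := by
      rw [List.isPrefixOf_iff_prefix]
      exact List.prefix_append _ _
    rw [hpre]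
    simp only [if_true]
    have hdrop : (o::(old'++Y)).drop (o::old').length = Y := by
      rw [show (o::old').length = old'.length + 1 from rfl, List.drop_succ_cons, List.drop_left]
    rw [hdrop, pvRepAux_eq (o::old') new (by simp) _ Y (by simp)]

lemma pref_append_false :
    ∀ (s old X : List Char), old.isPrefixOf s = false → s.isPrefixOf old = false →
      old.isPrefixOf (s ++ X) = false := by
  intro s
  induction s with
  | nil => intro old X h1 h2; simp [List.isPrefixOf] at h2
  | cons c s' ih =>
    intro old X h1 h2
    cases old with
    | nil => simp [List.isPrefixOf] at h1
    | cons o old' =>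
      simp only [List.cons_append, List.isPrefixOf] at h1 h2 ⊢
      by_cases hoc : o = c
      · subst hoc
        simp only [beq_self_eq_true, Bool.true_and] at h1 h2 ⊢
        exact ih old' X h1 h2
      · simp [beq_eq_false_iff_ne.mpr hoc]

lemma rep_block (old new b : List Char)
    (hb : ∀ m, m < b.length → old.isPrefixOf (b.drop m) = false ∧ (b.drop m).isPrefixOf old = false) :
    ∀ X, pvRep old new (b ++ X) = b ++ pvRep old new X := by
  induction b with
  | nil => intro X; simp
  | cons c b' ih =>
    intro X
    have h0 := hb 0 (by simp)
    simp only [List.drop_zero] at h0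
    rw [List.cons_append, rep_cons_neg old new c (b' ++ X)
      (pref_append_false (c::b') old X h0.1 h0.2)]
    rw [ih (fun m hm => by
      have := hb (m+1) (by simp at hm ⊢; omega)
      simpa using this) X]
    simp

-- a τ without '<' is a prefix of (pvRep old new u) only if it is a prefix of u,
-- provided the replacement text starts with '<'
lemma prefFree (old new : List Char) (hnew : new.head? = some '<') :
    ∀ (u τ : List Char), τ.all (fun a => !(a == '<')) = true →
      τ.isPrefixOf (pvRep old new u) = true → τ.isPrefixOf u = true := by
  intro u
  induction u with
  | nil =>
    intro τ hτ h
    rw [show pvRep old new [] = [] from rfl] at h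
    cases τ with
    | nil => rfl
    | cons a τ' => simp [List.isPrefixOf] at h
  | cons c t ih =>
    intro τ hτ h
    cases τ with
    | nil => rfl
    | cons a τ' =>
      cases hp : old.isPrefixOf (c :: t) with
      | true =>
        rw [pvRep, show (c::t).length = t.length + 1 from rfl,
          show pvRepAux old new (t.length+1) (c::t) =
            (if old.isPrefixOf (c::t) = true then
              new ++ pvRepAux old new t.length ((c::t).drop old.length)
            else c :: pvRepAux old new t.length t) from rfl, hp] at h
        simp only [if_true] at h
        cases new with
        | nil => simp at hnew
        | cons n0 new' =>
          have hn0 : n0 = '<' := by simpa using hnew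
          rw [List.cons_append] at h
          simp only [List.isPrefixOf, Bool.and_eq_true, beq_iff_eq] at h
          have ha := List.all_eq_true.mp hτ a (by simp)
          simp at ha
          exact absurd (h.1.trans hn0) ha
      | false =>
        rw [rep_cons_neg old new c t hp] at h
        simp only [List.isPrefixOf, Bool.and_eq_true] at h ⊢
        rw [List.all_cons, Bool.and_eq_true] at hτ
        exact ⟨h.1, ih τ' hτ.2 h.2⟩

-- pushing a character below '<' through all the replacements of a chain
lemma chain_cons_ne (c : Char) (hc : c ≠ '<') :
    ∀ (ps : List (List Char × List Char)), (∀ p ∈ ps, p.1.head? = some '<') →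
      ∀ u, ps.foldl (fun s p => pvRep p.1 p.2 s) (c :: u)
          = c :: ps.foldl (fun s p => pvRep p.1 p.2 s) u := by
  intro ps
  induction ps with
  | nil => intro _ u; simp
  | cons q ps' ih =>
    intro hps u
    have hq := hps q (by simp)
    simp only [List.foldl_cons]
    have hpref : q.1.isPrefixOf (c :: u) = false := by
      cases hq1 : q.1 with
      | nil => rw [hq1] at hq; simp at hq
      | cons k0 κ =>
        have hk0 : k0 = '<' := by rw [hq1] at hq; simpa using hq
        subst hk0
        simp [List.isPrefixOf, beq_eq_false_iff_ne.mpr (fun h => hc h.symm)]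
    rw [rep_cons_neg q.1 q.2 c u hpref]
    exact ih (fun p hp => hps p (by simp [hp])) (pvRep q.1 q.2 u)

-- pushing '<' through a chain none of whose keys matches here
lemma chain_cons_lt :
    ∀ (ps : List (List Char × List Char)) (u : List Char),
      (∀ p ∈ ps, p.1.head? = some '<' ∧ p.1.tail.all (fun a => !(a == '<')) = true ∧
        p.1.tail.isPrefixOf u = false ∧ p.2.head? = some '<') →
      ps.foldl (fun s p => pvRep p.1 p.2 s) ('<' :: u)
        = '<' :: ps.foldl (fun s p => pvRep p.1 p.2 s) u := by
  intro ps
  induction ps with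
  | nil => intro u _; simp
  | cons q ps' ih =>
    intro u hps
    obtain ⟨hq1, hq2, hq3, hq4⟩ := hps q (by simp)
    simp only [List.foldl_cons]
    have hpref : q.1.isPrefixOf ('<' :: u) = false := by
      cases hq : q.1 with
      | nil => rw [hq] at hq1; simp at hq1
      | cons k0 κ =>
        have hk0 : k0 = '<' := by rw [hq] at hq1; simpa using hq1
        rw [hq] at hq3
        simp only [List.tail_cons] at hq3
        simp [List.isPrefixOf, hk0, hq3]
    rw [rep_cons_neg q.1 q.2 '<' u hpref]
    refine ih (pvRep q.1 q.2 u) (fun p hp => ?_)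
    obtain ⟨hp1, hp2, hp3, hp4⟩ := hps p (by simp [hp])
    refine ⟨hp1, hp2, ?_, hp4⟩
    cases hB : p.1.tail.isPrefixOf (pvRep q.1 q.2 u) with
    | false => rfl
    | true => exact absurd (prefFree q.1 q.2 hq4 u p.1.tail hp2 hB) (by simp [hp3])

-- scan-side fuel lemmas
lemma pvTable_keys_len : ∀ p ∈ pvTable, 1 ≤ p.1.length := by decide

lemma pvScanAux_succ :
    ∀ (f : Nat) (l : List Char), l.length ≤ f → pvScanAux (f+1) l = pvScanAux f l := by
  intro f
  induction f with
  | zero => intro l hl; cases l with | nil => rfl | cons c t => simp at hl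
  | succ f ih =>
    intro l hl
    cases l with
    | nil => rfl
    | cons c t =>
      rw [show pvScanAux (f+1+1) (c::t) =
        (match pvTable.find? (fun p => p.1.isPrefixOf (c :: t)) with
        | some (k, r) => r ++ pvScanAux (f+1) ((c :: t).drop k.length)
        | none => c :: pvScanAux (f+1) t) from rfl]
      rw [show pvScanAux (f+1) (c::t) =
        (match pvTable.find? (fun p => p.1.isPrefixOf (c :: t)) with
        | some (k, r) => r ++ pvScanAux f ((c :: t).drop k.length)
        | none => c :: pvScanAux f t) from rfl]
      cases hf : pvTable.find? (fun p => p.1.isPrefixOf (c :: t)) with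
      | none => simp only []; rw [ih t (by simp at hl; omega)]
      | some p =>
        obtain ⟨k, r⟩ := p
        have hk := pvTable_keys_len _ (List.mem_of_find?_eq_some hf)
        simp only []
        rw [ih _ (by simp at hl hk ⊢; omega)]

lemma pvScanAux_eq :
    ∀ (f : Nat) (l : List Char), l.length ≤ f → pvScanAux f l = pvScan l := by
  intro f
  induction f with
  | zero => intro l hl; cases l with | nil => rfl | cons c t => simp at hl
  | succ f ih =>
    intro l hl
    rcases Nat.eq_or_lt_of_le hl with he | hlt
    · rw [pvScan, he]
    · rw [pvScanAux_succ f l (by omega), ih l (by omega)]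

lemma pvScan_cons (c : Char) (t : List Char) :
    pvScan (c :: t) = (match pvTable.find? (fun p => p.1.isPrefixOf (c :: t)) with
      | some (k, r) => r ++ pvScanAux t.length ((c :: t).drop k.length)
      | none => c :: pvScanAux t.length t) := rfl

lemma pvScan_match (k r rest : List Char) (hk : k ≠ [])
    (hfind : pvTable.find? (fun p => p.1.isPrefixOf (k ++ rest)) = some (k, r)) :
    pvScan (k ++ rest) = r ++ pvScan rest := by
  cases k with
  | nil => exact absurd rfl hk
  | cons c k' =>
    rw [List.cons_append] at hfind ⊢
    rw [pvScan_cons, hfind]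
    simp only []
    have hdrop : (c :: (k' ++ rest)).drop (c :: k').length = rest := by
      rw [show (c::k').length = k'.length + 1 from rfl, List.drop_succ_cons, List.drop_left]
    rw [hdrop, pvScanAux_eq (k' ++ rest).length rest (by simp)]

lemma pvScan_nomatch (c : Char) (t : List Char)
    (hfind : pvTable.find? (fun p => p.1.isPrefixOf (c :: t)) = none) :
    pvScan (c :: t) = c :: pvScan t := by
  rw [pvScan_cons, hfind]
  rfl

-- the main equivalence: six sequential replace passes = one table-driven scan
set_option maxRecDepth 8192 in
lemma chain_eq_scan : ∀ (n : Nat) (l : List Char), l.length ≤ n → pvChain l = pvScan l := by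
  intro n
  induction n with
  | zero =>
    intro l hl
    have hnil : l = [] := List.eq_nil_iff_length_eq_zero.mpr (Nat.le_zero.mp hl)
    subst hnil; rfl
  | succ n ih =>
    intro l hl
    cases l with
    | nil => rfl
    | cons c t =>
      cases h1 : List.isPrefixOf "<div".toList (c :: t) with
      | true =>
        obtain ⟨rest, hrest⟩ := List.isPrefixOf_iff_prefix.mp h1
        rw [← hrest] at hl ⊢
        have hIH := ih rest (by simp at hl; omega)
        have hfind : pvTable.find? (fun p => p.1.isPrefixOf ("<div".toList ++ rest))
            = some ("<div".toList, "<Box".toList) := by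
          rfl
        rw [pvScan_match _ _ rest (by decide) hfind]
        rw [pvChain]; simp only [pvKeys, List.foldl]
        rw [rep_match "<div".toList "<Box".toList (by decide) ]
        rw [rep_block "</div>".toList "</Box>".toList "<Box".toList (by decide)]
        rw [rep_block "<button".toList "<Button".toList "<Box".toList (by decide)]
        rw [rep_block "</button>".toList "</Button>".toList "<Box".toList (by decide)]
        rw [rep_block "<p>".toList "<Text>".toList "<Box".toList (by decide)]
        rw [rep_block "</p>".toList "</Text>".toList "<Box".toList (by decide)]
        rw [pvChain] at hIH; simp only [pvKeys, List.foldl] at hIH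
        rw [hIH]
      | false =>
        cases h2 : List.isPrefixOf "</div>".toList (c :: t) with
        | true =>
          obtain ⟨rest, hrest⟩ := List.isPrefixOf_iff_prefix.mp h2
          rw [← hrest] at hl ⊢
          have hIH := ih rest (by simp at hl; omega)
          have hfind : pvTable.find? (fun p => p.1.isPrefixOf ("</div>".toList ++ rest))
              = some ("</div>".toList, "</Box>".toList) := by
            rfl
          rw [pvScan_match _ _ rest (by decide) hfind]
          rw [pvChain]; simp only [pvKeys, List.foldl]
          rw [rep_block "<div".toList "<Box".toList "</div>".toList (by decide)]
          rw [rep_match "</div>".toList "</Box>".toList (by decide) ]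
          rw [rep_block "<button".toList "<Button".toList "</Box>".toList (by decide)]
          rw [rep_block "</button>".toList "</Button>".toList "</Box>".toList (by decide)]
          rw [rep_block "<p>".toList "<Text>".toList "</Box>".toList (by decide)]
          rw [rep_block "</p>".toList "</Text>".toList "</Box>".toList (by decide)]
          rw [pvChain] at hIH; simp only [pvKeys, List.foldl] at hIH
          rw [hIH]
        | false =>
          cases h3 : List.isPrefixOf "<button".toList (c :: t) with
          | true =>
            obtain ⟨rest, hrest⟩ := List.isPrefixOf_iff_prefix.mp h3
            rw [← hrest] at hl ⊢
            have hIH := ih rest (by simp at hl; omega)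
            have hfind : pvTable.find? (fun p => p.1.isPrefixOf ("<button".toList ++ rest))
                = some ("<button".toList, "<Button".toList) := by
              rfl
            rw [pvScan_match _ _ rest (by decide) hfind]
            rw [pvChain]; simp only [pvKeys, List.foldl]
            rw [rep_block "<div".toList "<Box".toList "<button".toList (by decide)]
            rw [rep_block "</div>".toList "</Box>".toList "<button".toList (by decide)]
            rw [rep_match "<button".toList "<Button".toList (by decide) ]
            rw [rep_block "</button>".toList "</Button>".toList "<Button".toList (by decide)]
            rw [rep_block "<p>".toList "<Text>".toList "<Button".toList (by decide)]
            rw [rep_block "</p>".toList "</Text>".toList "<Button".toList (by decide)]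
            rw [pvChain] at hIH; simp only [pvKeys, List.foldl] at hIH
            rw [hIH]
          | false =>
            cases h4 : List.isPrefixOf "</button>".toList (c :: t) with
            | true =>
              obtain ⟨rest, hrest⟩ := List.isPrefixOf_iff_prefix.mp h4
              rw [← hrest] at hl ⊢
              have hIH := ih rest (by simp at hl; omega)
              have hfind : pvTable.find? (fun p => p.1.isPrefixOf ("</button>".toList ++ rest))
                  = some ("</button>".toList, "</Button>".toList) := by
                rfl
              rw [pvScan_match _ _ rest (by decide) hfind]
              rw [pvChain]; simp only [pvKeys, List.foldl]
              rw [rep_block "<div".toList "<Box".toList "</button>".toList (by decide)]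
              rw [rep_block "</div>".toList "</Box>".toList "</button>".toList (by decide)]
              rw [rep_block "<button".toList "<Button".toList "</button>".toList (by decide)]
              rw [rep_match "</button>".toList "</Button>".toList (by decide) ]
              rw [rep_block "<p>".toList "<Text>".toList "</Button>".toList (by decide)]
              rw [rep_block "</p>".toList "</Text>".toList "</Button>".toList (by decide)]
              rw [pvChain] at hIH; simp only [pvKeys, List.foldl] at hIH
              rw [hIH]
            | false =>
              cases h5 : List.isPrefixOf "<p>".toList (c :: t) with
              | true =>
                obtain ⟨rest, hrest⟩ := List.isPrefixOf_iff_prefix.mp h5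
                rw [← hrest] at hl ⊢
                have hIH := ih rest (by simp at hl; omega)
                have hfind : pvTable.find? (fun p => p.1.isPrefixOf ("<p>".toList ++ rest))
                    = some ("<p>".toList, "<Text>".toList) := by
                  rfl
                rw [pvScan_match _ _ rest (by decide) hfind]
                rw [pvChain]; simp only [pvKeys, List.foldl]
                rw [rep_block "<div".toList "<Box".toList "<p>".toList (by decide)]
                rw [rep_block "</div>".toList "</Box>".toList "<p>".toList (by decide)]
                rw [rep_block "<button".toList "<Button".toList "<p>".toList (by decide)]
                rw [rep_block "</button>".toList "</Button>".toList "<p>".toList (by decide)]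
                rw [rep_match "<p>".toList "<Text>".toList (by decide) ]
                rw [rep_block "</p>".toList "</Text>".toList "<Text>".toList (by decide)]
                rw [pvChain] at hIH; simp only [pvKeys, List.foldl] at hIH
                rw [hIH]
              | false =>
                cases h6 : List.isPrefixOf "</p>".toList (c :: t) with
                | true =>
                  obtain ⟨rest, hrest⟩ := List.isPrefixOf_iff_prefix.mp h6
                  rw [← hrest] at hl ⊢
                  have hIH := ih rest (by simp at hl; omega)
                  have hfind : pvTable.find? (fun p => p.1.isPrefixOf ("</p>".toList ++ rest))
                      = some ("</p>".toList, "</Text>".toList) := by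
                    rfl
                  rw [pvScan_match _ _ rest (by decide) hfind]
                  rw [pvChain]; simp only [pvKeys, List.foldl]
                  rw [rep_block "<div".toList "<Box".toList "</p>".toList (by decide)]
                  rw [rep_block "</div>".toList "</Box>".toList "</p>".toList (by decide)]
                  rw [rep_block "<button".toList "<Button".toList "</p>".toList (by decide)]
                  rw [rep_block "</button>".toList "</Button>".toList "</p>".toList (by decide)]
                  rw [rep_block "<p>".toList "<Text>".toList "</p>".toList (by decide)]
                  rw [rep_match "</p>".toList "</Text>".toList (by decide) ]
                  rw [pvChain] at hIH; simp only [pvKeys, List.foldl] at hIH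
                  rw [hIH]
                | false =>
                  have hfind : pvTable.find? (fun p => p.1.isPrefixOf (c :: t)) = none := by
                    have h1' : List.isPrefixOf ['<', 'd', 'i', 'v'] (c :: t) = false := h1
                    have h2' : List.isPrefixOf ['<', '/', 'd', 'i', 'v', '>'] (c :: t) = false := h2
                    have h3' : List.isPrefixOf ['<', 'b', 'u', 't', 't', 'o', 'n'] (c :: t) = false := h3
                    have h4' : List.isPrefixOf ['<', '/', 'b', 'u', 't', 't', 'o', 'n', '>'] (c :: t) = false := h4
                    have h5' : List.isPrefixOf ['<', 'p', '>'] (c :: t) = false := h5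
                    have h6' : List.isPrefixOf ['<', '/', 'p', '>'] (c :: t) = false := h6
                    simp [pvTable, List.find?, h1', h2', h3', h4', h5', h6']
                  rw [pvScan_nomatch c t hfind]
                  have ht : t.length ≤ n := by simp at hl; omega
                  have hcht := ih t ht
                  rw [pvChain] at hcht ⊢
                  by_cases hc : c = '<'
                  · subst hc
                    rw [chain_cons_lt pvKeys t ?_, hcht]
                    intro p hp
                    simp only [pvKeys, List.mem_cons, List.not_mem_nil, or_false] at hp
                    rcases hp with rfl | rfl | rfl | rfl | rfl | rfl
                    · exact ⟨by decide, by decide, by simpa [List.isPrefixOf] using h1, by decide⟩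
                    · exact ⟨by decide, by decide, by simpa [List.isPrefixOf] using h2, by decide⟩
                    · exact ⟨by decide, by decide, by simpa [List.isPrefixOf] using h3, by decide⟩
                    · exact ⟨by decide, by decide, by simpa [List.isPrefixOf] using h4, by decide⟩
                    · exact ⟨by decide, by decide, by simpa [List.isPrefixOf] using h5, by decide⟩
                    · exact ⟨by decide, by decide, by simpa [List.isPrefixOf] using h6, by decide⟩
                  · rw [chain_cons_ne c hc pvKeys (by decide) t, hcht]

-- ===== VERDICT (by name: the statement is the Claim_ definition above) =====
theorem fix_chakra_component_usage_py_spec : Claim_equal_fix_chakra_component_usage_py := by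
  intro code _
  unfold Spec_fix_chakra_component_usage_py
  show fix_chakra_component_usage_py code = fix_chakra_component_usage_py_alt code
  have hrep : ∀ (s o n : String), o.toList ≠ [] →
      PySem.Str.replace s o n = String.ofList (pvRep o.toList n.toList s.toList) := by
    intro s o n ho
    rw [show PySem.Str.replace s o n
      = String.ofList (PySem.Chars.replace s.toList o.toList n.toList) from rfl,
      replace_eq_rep _ _ _ ho]
  rw [show fix_chakra_component_usage_py code =
    PySem.Str.replace (PySem.Str.replace (PySem.Str.replace (PySem.Str.replace (PySem.Str.replace
      (PySem.Str.replace code "<div" "<Box") "</div>" "</Box>") "<button" "<Button")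
      "</button>" "</Button>") "<p>" "<Text>") "</p>" "</Text>" from rfl]
  rw [hrep _ "<div" "<Box" (by decide)]
  rw [hrep _ "</div>" "</Box>" (by decide)]
  rw [hrep _ "<button" "<Button" (by decide)]
  rw [hrep _ "</button>" "</Button>" (by decide)]
  rw [hrep _ "<p>" "<Text>" (by decide)]
  rw [hrep _ "</p>" "</Text>" (by decide)]
  simp only [String.toList_ofList]
  have hc := chain_eq_scan code.toList.length code.toList (le_refl _)
  rw [pvChain] at hc; simp only [pvKeys, List.foldl] at hc
  rw [hc]
  rfl
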